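-- pv_equiv track=rewrite | github.com/super30admin/Hashing-1 | Problem3_Pattern.py | helper
-- ===== SOURCE A (Python) =====
-- def helper(word):
--     result, mapper, j = [],{},1
--     for i in word:
--         if i not in mapper:
--             mapper[i] = j
--             j+=1
--         result.append(mapper[i])
--     return result
-- ===== SOURCE B (Python) =====
-- def helper(word):
--     return [len(set(word[:word.find(c) + 1])) for c in word]
-- ===== Notes on version B (the rewrite author's own statement) =====
-- stated objective: alternative
-- what changed: B keeps no mapping table or counter at all: each character's label is computed directly as the number of distinct characters in the prefix of the word up to and including that character's first occurrence (find + set + len), instead of A's incremental dict-and-counter labelling loop.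
import Mathlib
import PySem

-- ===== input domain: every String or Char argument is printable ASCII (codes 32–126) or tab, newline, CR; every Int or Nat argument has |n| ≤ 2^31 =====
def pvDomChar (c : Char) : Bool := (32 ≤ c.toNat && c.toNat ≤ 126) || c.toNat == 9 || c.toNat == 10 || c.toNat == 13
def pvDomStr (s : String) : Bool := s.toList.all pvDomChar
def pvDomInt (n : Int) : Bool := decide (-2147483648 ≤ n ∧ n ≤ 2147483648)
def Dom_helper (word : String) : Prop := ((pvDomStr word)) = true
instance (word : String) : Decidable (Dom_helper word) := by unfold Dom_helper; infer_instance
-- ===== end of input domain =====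

-- B keeps no mapping table at all: each character's label is the number of distinct
-- characters in the prefix up to and including its first occurrence (objective: alternative).

-- ===== PORT A =====
-- loop body of A's 'for i in word' (state: result, mapper, j); mapper[i] is always
-- present when read (it was just inserted if missing), so the total 'getD _ 0' form is exact
def aStep (st : List Int × PySem.Dict Char Int × Int) (i : Char) :
    List Int × PySem.Dict Char Int × Int :=
  let result := st.1
  let mapper := st.2.1
  let j := st.2.2
  let (mapper, j) := if mapper.contains i = false then (mapper.insert i j, j + 1) else (mapper, j)
  (result ++ [mapper.getD i 0], mapper, j)

def helper (word : String) : List Int :=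
  (word.toList.foldl aStep ([], PySem.Dict.empty, 1)).1

-- ===== PORT B =====
-- [len(set(word[:word.find(c) + 1])) for c in word]
def helper_alt (word : String) : List Int :=
  word.toList.map (fun c =>
    ((PySem.Set.ofList
        (PySem.List.slice word.toList none (some (PySem.Chars.find word.toList [c] + 1)))).length : Int))

-- ===== PRECONDITION & SPEC =====
def Spec_helper (word : String) (out : List Int) : Prop := out = helper_alt word
instance (word : String) (out : List Int) : Decidable (Spec_helper word out) := by unfold Spec_helper; infer_instance

-- ===== CLAIM (what is proved, stated in full; the proofs are below) =====
def Claim_equal_helper : Prop := ∀ (word : String), Dom_helper word → Spec_helper word (helper word)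

-- ===== LEMMAS AND PROOFS =====

-- proof-only intermediate: the first-occurrence label table A maintains
def bMapper (l : List Char) : PySem.Dict Char Int :=
  (PySem.List.enumerate (PySem.List.dedup l) 1).foldl
    (fun d p => d.insert p.2 p.1) PySem.Dict.empty

-- lookups pass through inserts at other keys
theorem get?_foldl_insert_of_ne (ps : List (Int × Char)) (d : PySem.Dict Char Int) (c : Char)
    (h : ∀ p ∈ ps, p.2 ≠ c) :
    (ps.foldl (fun d p => d.insert p.2 p.1) d).get? c = d.get? c := by
  induction ps generalizing d with
  | nil => rfl
  | cons p ps ih =>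
      simp only [List.foldl_cons]
      rw [ih _ (fun q hq => h q (List.mem_cons_of_mem _ hq)), PySem.Dict.get?_insert,
        if_neg (Ne.symm (h p (List.mem_cons_self ..)))]

theorem ofList_append_char (s : List Char) (c : Char) :
    PySem.Set.ofList (s ++ [c]) =
      if c ∈ s then PySem.Set.ofList s else PySem.Set.ofList s ++ [c] := by
  by_cases hc : c ∈ s
  · simp [PySem.Set.ofList_append_singleton, hc]
  · simp [PySem.Set.ofList_append_singleton, hc]

theorem keys_bMapper (l : List Char) : (bMapper l).keys = PySem.List.dedup l := by
  unfold bMapper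
  rw [PySem.Dict.keys_foldl_insert_key (key := fun p : Int × Char => p.2)
    (f := fun _ p => p.1)]
  simp [PySem.List.map_snd_enumerate, PySem.Set.update_nil_left,
    PySem.Set.ofList_ofList]

theorem contains_bMapper (l : List Char) (c : Char) :
    (bMapper l).contains c = decide (c ∈ l) := by
  by_cases hc : c ∈ l
  · simp only [hc, decide_true]
    rw [PySem.Dict.contains_iff_mem_keys, keys_bMapper]
    simpa using hc
  · simp only [hc, decide_false]
    rw [← Bool.not_eq_true, PySem.Dict.contains_iff_mem_keys, keys_bMapper]
    simpa using hc

theorem bMapper_append_singleton (s : List Char) (c : Char) :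
    bMapper (s ++ [c]) =
      if c ∈ s then bMapper s
      else (bMapper s).insert c ((PySem.List.dedup s).length + 1) := by
  by_cases hc : c ∈ s
  · simp [bMapper, ofList_append_char, hc]
  · simp only [bMapper, PySem.List.dedup_eq_ofList, ofList_append_char, hc, if_false,
      PySem.List.enumerate_append, List.foldl_append]
    simp [PySem.List.enumerate, add_comm]

theorem get?_bMapper_append (s t : List Char) (c : Char) (hc : c ∈ s) :
    (bMapper (s ++ t)).get? c = (bMapper s).get? c := by
  have hd : PySem.List.dedup (s ++ t) =
      PySem.List.dedup s ++
        (PySem.Set.ofList t).filter (fun y => !(PySem.Set.contains (PySem.Set.ofList s) y)) := by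
    simp [PySem.Set.ofList_append, PySem.Set.update_eq_append_filter]
  unfold bMapper
  rw [hd, PySem.List.enumerate_append, List.foldl_append]
  refine get?_foldl_insert_of_ne _ _ _ ?_
  intro p hp
  rcases (PySem.List.mem_enumerate_iff _ _ _).1 hp with ⟨k, hk, rfl⟩
  simp only
  intro hpc
  have hmem := List.getElem_mem hk
  rw [hpc, List.mem_filter] at hmem
  have h2 : c ∉ s := by simpa using hmem.2
  exact h2 hc

theorem getD_bMapper_append (s t : List Char) (c : Char) (hc : c ∈ s) :
    (bMapper (s ++ t)).getD c 0 = (bMapper s).getD c 0 := by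
  rw [PySem.Dict.getD_eq_get?_getD, PySem.Dict.getD_eq_get?_getD, get?_bMapper_append s t c hc]

theorem aLoop_invariant (rest : List Char) : ∀ (s : List Char) (r : List Int),
    rest.foldl aStep (r, bMapper s, ((PySem.List.dedup s).length : Int) + 1)
      = (r ++ rest.map (fun c => (bMapper (s ++ rest)).getD c 0),
         bMapper (s ++ rest), ((PySem.List.dedup (s ++ rest)).length : Int) + 1) := by
  induction rest with
  | nil => intro s r; simp
  | cons c rest ih =>
      intro s r
      have hstep : aStep (r, bMapper s, ((PySem.List.dedup s).length : Int) + 1) c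
          = (r ++ [(bMapper (s ++ [c])).getD c 0], bMapper (s ++ [c]),
             ((PySem.List.dedup (s ++ [c])).length : Int) + 1) := by
        by_cases hc : c ∈ s
        · simp [aStep, contains_bMapper, hc, bMapper_append_singleton, ofList_append_char]
        · simp [aStep, contains_bMapper, hc, bMapper_append_singleton, ofList_append_char]
      rw [List.foldl_cons, hstep, ih (s ++ [c]) (r ++ [(bMapper (s ++ [c])).getD c 0])]
      have hassoc : (s ++ [c]) ++ rest = s ++ (c :: rest) := by simp
      rw [hassoc]
      simp only [List.append_assoc, List.singleton_append, List.map_cons]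
      rw [← hassoc, getD_bMapper_append (s ++ [c]) rest c (by simp)]

-- A as a pointwise map through the full table
theorem helper_eq_map (word : String) :
    helper word = word.toList.map (fun c => (bMapper word.toList).getD c 0) := by
  unfold helper
  have h0 : (PySem.Dict.empty : PySem.Dict Char Int) = bMapper [] := rfl
  have h1 : (1 : Int) = ((PySem.List.dedup ([] : List Char)).length : Int) + 1 := by
    simp [PySem.List.dedup]
  rw [h0, h1, aLoop_invariant word.toList [] []]
  simp

-- [c] is a prefix of l.drop n iff l[n]? = c
theorem singleton_prefix_drop_iff (l : List Char) (c : Char) (n : Nat) :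
    ([c] <+: l.drop n) ↔ l[n]? = some c := by
  rw [← List.head?_drop]
  cases hd : l.drop n with
  | nil => simp [List.IsPrefix]
  | cons x xs =>
      constructor
      · rintro ⟨t, ht⟩
        simp_all
      · intro hx
        exact ⟨xs, by simp_all⟩

-- find of a single character points at its first occurrence
theorem find_first_split (s t : List Char) (c : Char) (hc : c ∉ s) :
    PySem.Chars.find (s ++ c :: t) [c] = (s.length : Int) := by
  set l := s ++ c :: t with hl
  have hmemidx : l[s.length]? = some c := by
    simp [hl]
  have hin : (0 : Int) ≤ PySem.Chars.find l [c] := by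
    rw [PySem.Chars.find_nonneg_iff]
    rcases (PySem.Chars.exists_prefix_drop_iff_isIn (sub := [c]) (s := l)).1
        ⟨s.length, (singleton_prefix_drop_iff l c s.length).2 hmemidx⟩ with h
    exact (PySem.Chars.isIn_iff_infix _ _).1 h
  obtain ⟨hpre, hmin⟩ := PySem.Chars.find_spec (s := l) (sub := [c]) hin
  have hat : l[(PySem.Chars.find l [c]).toNat]? = some c :=
    (singleton_prefix_drop_iff _ _ _).1 hpre
  have hne : (PySem.Chars.find l [c]).toNat = s.length := by
    rcases Nat.lt_trichotomy (PySem.Chars.find l [c]).toNat s.length with h | h | h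
    · exfalso
      have : l[(PySem.Chars.find l [c]).toNat]? = s[(PySem.Chars.find l [c]).toNat]? := by
        rw [hl, List.getElem?_append_left h]
      rw [this, List.getElem?_eq_getElem h] at hat
      have hceq : s[(PySem.Chars.find l [c]).toNat] = c := by simpa using hat
      exact hc (hceq ▸ List.getElem_mem h)
    · exact h
    · exact absurd ((singleton_prefix_drop_iff l c s.length).2 hmemidx) (hmin s.length h)
  omega

-- the distinct-count of the prefix through the first occurrence is (dedup s).length + 1
theorem set_take_first (s t : List Char) (c : Char) (hc : c ∉ s) :
    (PySem.Set.ofList ((s ++ c :: t).take (s.length + 1))).length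
      = (PySem.List.dedup s).length + 1 := by
  have htake : (s ++ c :: t).take (s.length + 1) = s ++ [c] := by
    rw [List.take_append]
    simp
  rw [htake, ofList_append_char, if_neg hc]
  simp [PySem.List.dedup_eq_ofList]

-- first-occurrence decomposition of a member
theorem exists_first_split (l : List Char) (c : Char) (hc : c ∈ l) :
    ∃ s t, l = s ++ c :: t ∧ c ∉ s := by
  induction l with
  | nil => cases hc
  | cons x xs ih =>
      by_cases hx : x = c
      · exact ⟨[], xs, by simp [hx], by simp⟩
      · have hcx : c ∈ xs := by
          rcases List.mem_cons.1 hc with h | h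
          · exact absurd h.symm hx
          · exact h
        rcases ih hcx with
          ⟨s, t, rfl, hns⟩
        exact ⟨x :: s, t, rfl, by simp [hns, Ne.symm hx]⟩

-- pointwise: A's table lookup equals B's prefix distinct-count
theorem pointwise_eq (l : List Char) (c : Char) (hc : c ∈ l) :
    (bMapper l).getD c 0
      = ((PySem.Set.ofList
            (PySem.List.slice l none (some (PySem.Chars.find l [c] + 1)))).length : Int) := by
  rcases exists_first_split l c hc with ⟨s, t, rfl, hns⟩
  have hfind := find_first_split s t c hns
  rw [hfind]
  have hb : ((s.length : Int) + 1) = ((s.length + 1 : Nat) : Int) := by push_cast; ring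
  rw [hb, PySem.List.slice_to_natCast, set_take_first s t c hns]
  have ha : s ++ c :: t = (s ++ [c]) ++ t := by simp
  rw [ha, getD_bMapper_append (s ++ [c]) t c (by simp),
    show s ++ [c] = s ++ [c] from rfl, bMapper_append_singleton, if_neg hns,
    PySem.Dict.getD_insert]
  simp

-- ===== VERDICT (by name: the statement is the Claim_ definition above) =====
theorem helper_spec : Claim_equal_helper := by
  intro word _
  show helper word = helper_alt word
  rw [helper_eq_map]
  unfold helper_alt
  exact List.map_congr_left (fun c hc => pointwise_eq word.toList c hc)
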